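-- pv_equiv track=rewrite | github.com/HKU-BAL/Clair3 | preprocess/CreateTrainingTensorDirect.py | _decode_alt
-- ===== SOURCE A (Python) =====
-- def _decode_alt(ref_base, alt_base):
--     """Decode possibly multi-allelic alt bases."""
--     if ',' not in alt_base:
--         return [ref_base], [alt_base]
--     alt_base = alt_base.split(',')
--     ref_base_list, alt_base_list = [], []
--     for ab in alt_base:
--         rb, ab = _remove_common_suffix(ref_base, [ab])
--         ref_base_list.append(rb)
--         alt_base_list.append(ab[0])
--     return ref_base_list, alt_base_list
--
-- def _remove_common_suffix(ref_base, alt_base):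
--     """Remove common suffix between ref and alt bases."""
--     min_length = min(len(ref_base) - 1, min([len(item) - 1 for item in alt_base]))
--     prefix = ref_base[::-1]
--     for string in alt_base:
--         string = string[::-1]
--         while string[:len(prefix)] != prefix and prefix:
--             prefix = prefix[:len(prefix) - 1]
--         if not prefix:
--             break
--     res_length = len(prefix)
--     if res_length > min_length:
--         return ref_base, alt_base
--     return ref_base[:len(ref_base) - res_length], [item[:len(item) - res_length] for item in alt_base]
-- ===== SOURCE B (Python) =====
-- def _decode_alt(ref_base, alt_base):
--     """Decode possibly multi-allelic alt bases (single linear pass per allele)."""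
--     if ',' not in alt_base:
--         return [ref_base], [alt_base]
--     ref_base_list, alt_base_list = [], []
--     for ab in alt_base.split(','):
--         # common-suffix length: one linear zip over the reversed strings
--         suffix = 0
--         for x, y in zip(reversed(ref_base), reversed(ab)):
--             if x != y:
--                 break
--             suffix += 1
--         if suffix > min(len(ref_base), len(ab)) - 1:
--             ref_base_list.append(ref_base)
--             alt_base_list.append(ab)
--         else:
--             ref_base_list.append(ref_base[:len(ref_base) - suffix])
--             alt_base_list.append(ab[:len(ab) - suffix])
--     return ref_base_list, alt_base_list
-- ===== Notes on version B (the rewrite author's own statement) =====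
-- stated objective: simpler
-- what changed: Replaced the _remove_common_suffix helper's repeated slice-and-compare prefix-shrink loop (quadratic in the suffix mismatch) by a single linear zip over the two reversed strings that counts the common suffix length directly, inlined per allele.
import Mathlib
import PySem

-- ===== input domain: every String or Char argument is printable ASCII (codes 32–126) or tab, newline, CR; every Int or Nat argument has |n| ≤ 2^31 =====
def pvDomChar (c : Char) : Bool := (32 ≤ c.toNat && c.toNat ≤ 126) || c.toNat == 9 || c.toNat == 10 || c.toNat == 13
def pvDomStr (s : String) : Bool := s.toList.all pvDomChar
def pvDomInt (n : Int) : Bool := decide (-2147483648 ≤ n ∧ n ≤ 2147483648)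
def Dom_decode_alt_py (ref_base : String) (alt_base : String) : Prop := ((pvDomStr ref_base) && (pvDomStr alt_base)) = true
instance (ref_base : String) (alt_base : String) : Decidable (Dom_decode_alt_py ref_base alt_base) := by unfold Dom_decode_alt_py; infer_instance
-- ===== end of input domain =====

-- B replaces A's quadratic reversed-prefix-shrink helper by one linear backward zip per allele (simpler, and faster on long alleles).

-- ===== PORT A =====
-- the 'while string[:len(prefix)] != prefix and prefix:' shrink loop (s = reversed string, p = prefix)
def pvShrink (s p : List Char) : List Char :=
  if h : s.take p.length ≠ p ∧ p ≠ [] then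
    pvShrink s (p.take (p.length - 1))
  else p
termination_by p.length
decreasing_by
  have : p.length ≠ 0 := fun hz => h.2 (List.eq_nil_of_length_eq_zero hz)
  simp [List.length_take]; omega

-- the 'for string in alt_base: … if not prefix: break' loop of _remove_common_suffix
def pvLoopA (pfx : List Char) (alts : List (List Char)) : List Char :=
  match alts with
  | [] => pfx
  | s :: rest =>
      let p' := pvShrink s.reverse pfx   -- string = string[::-1] is reverse
      if p' = [] then p' else pvLoopA p' rest

-- _remove_common_suffix; Python's min([...]) over the (always nonempty at the call site) list is min?;
-- the .getD 0 default is only for the empty-list case, where Python raises and which A never reaches.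
def pvRemoveCommonSuffix (ref : List Char) (alts : List (List Char)) : List Char × List (List Char) :=
  let minLength : Int :=
    min ((ref.length : Int) - 1)
        ((PySem.List.min? (alts.map fun it => (it.length : Int) - 1) (fun x => x)).getD 0)
  let res := pvLoopA ref.reverse alts    -- prefix = ref_base[::-1] is reverse
  let resLength := res.length
  if (resLength : Int) > minLength then (ref, alts)
  else (ref.take (ref.length - resLength), alts.map fun it => it.take (it.length - resLength))

def decode_alt_py (ref_base : String) (alt_base : String) : List String × List String :=
  if !(PySem.Str.isIn "," alt_base) then ([ref_base], [alt_base])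
  else
    (PySem.Chars.splitOn alt_base.toList [',']).foldl
      (fun (acc : List String × List String) ab =>
        let r := pvRemoveCommonSuffix ref_base.toList [ab]
        -- ab[0] on the returned list; the list is always a singleton here
        (acc.1 ++ [String.ofList r.1], acc.2 ++ [String.ofList (PySem.List.pyGetD r.2 0 [])]))
      ([], [])

-- ===== PORT B =====
-- common-suffix length: linear zip over the two reversed strings, stop at first mismatch
def pvCpl : List Char → List Char → Nat
  | a :: x, b :: y => if a = b then pvCpl x y + 1 else 0
  | _, _ => 0

def decode_alt_py_alt (ref_base : String) (alt_base : String) : List String × List String :=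
  if !(PySem.Str.isIn "," alt_base) then ([ref_base], [alt_base])
  else
    (PySem.Chars.splitOn alt_base.toList [',']).foldl
      (fun (acc : List String × List String) ab =>
        let rl := ref_base.toList
        let suffix := pvCpl rl.reverse ab.reverse
        if (suffix : Int) > min (rl.length : Int) (ab.length : Int) - 1 then
          (acc.1 ++ [ref_base], acc.2 ++ [String.ofList ab])
        else
          (acc.1 ++ [String.ofList (rl.take (rl.length - suffix))],
           acc.2 ++ [String.ofList (ab.take (ab.length - suffix))]))
      ([], [])

-- ===== PRECONDITION & SPEC =====
def Spec_decode_alt_py (ref_base : String) (alt_base : String) (out : List String × List String) : Prop := out = decode_alt_py_alt ref_base alt_base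
instance (ref_base : String) (alt_base : String) (out : List String × List String) : Decidable (Spec_decode_alt_py ref_base alt_base out) := by unfold Spec_decode_alt_py; infer_instance

-- ===== CLAIM (what is proved, stated in full; the proofs are below) =====
def Claim_equal_decode_alt_py : Prop := ∀ (ref_base : String) (alt_base : String), Dom_decode_alt_py ref_base alt_base → Spec_decode_alt_py ref_base alt_base (decode_alt_py ref_base alt_base)

-- ===== LEMMAS AND PROOFS =====

lemma pvCpl_le_length (p s : List Char) : pvCpl p s ≤ p.length := by
  induction p generalizing s with
  | nil => simp [pvCpl]
  | cons a x ih =>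
    cases s with
    | nil => simp [pvCpl]
    | cons b y =>
      by_cases h : a = b <;> simp [pvCpl, h]
      exact ih y

lemma pvCpl_of_prefix (p s : List Char) (h : p <+: s) : pvCpl p s = p.length := by
  induction p generalizing s with
  | nil => simp [pvCpl]
  | cons a x ih =>
    cases s with
    | nil => simp at h
    | cons b y =>
      obtain ⟨hab, hxy⟩ := by simpa [List.cons_prefix_cons] using h
      simp [pvCpl, hab, ih y hxy]

lemma pvCpl_lt_of_not_prefix (p s : List Char) (h : ¬ p <+: s) : pvCpl p s < p.length := by
  induction p generalizing s with
  | nil => exact absurd (List.nil_prefix) h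
  | cons a x ih =>
    cases s with
    | nil => simp [pvCpl]
    | cons b y =>
      by_cases hab : a = b
      · subst hab
        have hxy : ¬ x <+: y := fun hp => h (by simp [List.cons_prefix_cons, hp])
        simp [pvCpl]
        exact ih y hxy
      · simp [pvCpl, hab]

lemma pvCpl_take (p s : List Char) (k : Nat) : pvCpl (p.take k) s = min k (pvCpl p s) := by
  induction p generalizing s k with
  | nil => simp [pvCpl]
  | cons a x ih =>
    cases k with
    | zero => simp [pvCpl]
    | succ k' =>
      cases s with
      | nil => simp [pvCpl]
      | cons b y =>
        by_cases h : a = b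
        · simp [pvCpl, h, ih y k']
        · simp [pvCpl, h]

lemma pvShrink_eq_take_cpl (s p : List Char) : pvShrink s p = p.take (pvCpl p s) := by
  induction p using pvShrink.induct s with
  | case1 q hq ih =>
    rw [pvShrink, dif_pos hq, ih]
    have hnp : ¬ q <+: s := by
      intro hp
      exact hq.1 (List.prefix_iff_eq_take.mp hp).symm
    have hlt := pvCpl_lt_of_not_prefix q s hnp
    rw [pvCpl_take, List.take_take]
    congr 1; omega
  | case2 q hq =>
    rw [pvShrink, dif_neg hq]
    rcases not_and_or.mp hq with h1 | h2
    · have hp : q <+: s := List.prefix_iff_eq_take.mpr (not_ne_iff.mp h1).symm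
      rw [pvCpl_of_prefix q s hp, List.take_length]
    · simp [not_ne_iff.mp h2, pvCpl]

lemma pvLoopA_singleton (pfx ab : List Char) :
    pvLoopA pfx [ab] = pvShrink ab.reverse pfx := by
  by_cases h : pvShrink ab.reverse pfx = [] <;> simp [pvLoopA, h]

-- the two per-allele step functions of the folds agree
lemma pvStep_eq (ref_base : String) (acc : List String × List String) (ab : List Char) :
    (let r := pvRemoveCommonSuffix ref_base.toList [ab]
     (acc.1 ++ [String.ofList r.1], acc.2 ++ [String.ofList (PySem.List.pyGetD r.2 0 [])]))
    =
    (let rl := ref_base.toList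
     let suffix := pvCpl rl.reverse ab.reverse
     if (suffix : Int) > min (rl.length : Int) (ab.length : Int) - 1 then
       (acc.1 ++ [ref_base], acc.2 ++ [String.ofList ab])
     else
       (acc.1 ++ [String.ofList (rl.take (rl.length - suffix))],
        acc.2 ++ [String.ofList (ab.take (ab.length - suffix))])) := by
  have hres : pvLoopA ref_base.toList.reverse [ab]
      = ref_base.toList.reverse.take (pvCpl ref_base.toList.reverse ab.reverse) := by
    rw [pvLoopA_singleton, pvShrink_eq_take_cpl]
  have hlen : (pvLoopA ref_base.toList.reverse [ab]).length
      = pvCpl ref_base.toList.reverse ab.reverse := by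
    rw [hres, List.length_take]
    have := pvCpl_le_length ref_base.toList.reverse ab.reverse
    simp at this ⊢
    omega
  unfold pvRemoveCommonSuffix
  simp only [List.map_cons, List.map_nil, PySem.List.min?_id_cons, List.foldl_nil,
    Option.getD_some, hlen]
  have hmin : min ((ref_base.toList.length : Int) - 1) ((ab.length : Int) - 1)
      = min (ref_base.toList.length : Int) (ab.length : Int) - 1 := by omega
  rw [hmin]
  split
  · simp [PySem.List.pyGetD_zero_cons, String.ofList_toList]
  · simp [PySem.List.pyGetD_zero_cons]

-- ===== VERDICT (by name: the statement is the Claim_ definition above) =====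
theorem decode_alt_py_spec : Claim_equal_decode_alt_py := by
  intro ref_base alt_base _
  unfold Spec_decode_alt_py decode_alt_py decode_alt_py_alt
  by_cases h : PySem.Str.isIn "," alt_base <;> simp only [h, Bool.not_true, Bool.not_false, if_true]
  have hf : (fun (acc : List String × List String) ab =>
      let r := pvRemoveCommonSuffix ref_base.toList [ab]
      (acc.1 ++ [String.ofList r.1], acc.2 ++ [String.ofList (PySem.List.pyGetD r.2 0 [])]))
      = (fun (acc : List String × List String) ab =>
         let rl := ref_base.toList
         let suffix := pvCpl rl.reverse ab.reverse
         if (suffix : Int) > min (rl.length : Int) (ab.length : Int) - 1 then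
           (acc.1 ++ [ref_base], acc.2 ++ [String.ofList ab])
         else
           (acc.1 ++ [String.ofList (rl.take (rl.length - suffix))],
            acc.2 ++ [String.ofList (ab.take (ab.length - suffix))])) := by
    funext acc ab
    exact pvStep_eq ref_base acc ab
  rw [hf]
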